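-- pv_equiv track=rewrite | github.com/sousinha1997/Quisby | src/pquisby/lib/util.py | combine_two_array_alternating
-- ===== SOURCE A (Python) =====
-- invalid_compare_list = ["pig"]
--
-- def combine_two_array_alternating(results, value, ele, test_name):
--     indexer = []
--
--     for lindex, item1 in enumerate(value[0][1:]):
--         for rindex, item2 in enumerate(ele[0][1:]):
--             if item1.split("-", 1)[0] == item2.split("-", 1)[0]:
--                 indexer.append([lindex, rindex])
--             elif test_name in invalid_compare_list:
--                 indexer.append([lindex, rindex])
--
--     for list1, list2 in zip(value, ele):
--         holder_list = []
--         holder_list.append(list1[0])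
--
--         for index in indexer:
--             holder_list.append(list1[index[0] + 1])
--             holder_list.append(list2[index[1] + 1])
--
--         results.append(holder_list)
--
--     return results
-- ===== SOURCE B (Python) =====
-- invalid_compare_list = ["pig"]
--
--
-- # B: group right-column indices by their "-"-prefix in a dict (one pass over each
-- # header row) instead of scanning all right columns for every left column, and build
-- # each output row by extended-slice assignment instead of per-pair appends.
-- # Like A, appends the combined rows to `results` in place and returns it.
-- def combine_two_array_alternating(results, value, ele, test_name):
--     left = value[0][1:]
--     right = ele[0][1:]
--
--     if test_name in invalid_compare_list:
--         pairs = [(l, r) for l in range(len(left)) for r in range(len(right))]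
--     else:
--         groups = {}
--         for r, item in enumerate(right):
--             groups.setdefault(item.split("-", 1)[0], []).append(r)
--         pairs = [(l, r)
--                  for l, item in enumerate(left)
--                  for r in groups.get(item.split("-", 1)[0], [])]
--
--     li = [p[0] + 1 for p in pairs]
--     ri = [p[1] + 1 for p in pairs]
--     width = 2 * len(pairs) + 1
--
--     for row1, row2 in zip(value, ele):
--         row = [row1[0]] * width
--         row[1::2] = [row1[i] for i in li]
--         row[2::2] = [row2[i] for i in ri]
--         results.append(row)
--     return results
-- ===== Notes on version B (the rewrite author's own statement) =====
-- stated objective: alternative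
-- what changed: B replaces A's nested scan of the two header rows by a dict that groups right-column indices by their '-'-prefix, built in one pass and looked up per left column (full index product emitted directly for the 'pig' test name), and builds each output row by extended-slice assignment into a preallocated list instead of per-pair appends.
-- outside the precondition, e.g. on combine_two_array_alternating([], [['a']], [], 'x'): A returns [], B raises IndexError
import Mathlib
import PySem

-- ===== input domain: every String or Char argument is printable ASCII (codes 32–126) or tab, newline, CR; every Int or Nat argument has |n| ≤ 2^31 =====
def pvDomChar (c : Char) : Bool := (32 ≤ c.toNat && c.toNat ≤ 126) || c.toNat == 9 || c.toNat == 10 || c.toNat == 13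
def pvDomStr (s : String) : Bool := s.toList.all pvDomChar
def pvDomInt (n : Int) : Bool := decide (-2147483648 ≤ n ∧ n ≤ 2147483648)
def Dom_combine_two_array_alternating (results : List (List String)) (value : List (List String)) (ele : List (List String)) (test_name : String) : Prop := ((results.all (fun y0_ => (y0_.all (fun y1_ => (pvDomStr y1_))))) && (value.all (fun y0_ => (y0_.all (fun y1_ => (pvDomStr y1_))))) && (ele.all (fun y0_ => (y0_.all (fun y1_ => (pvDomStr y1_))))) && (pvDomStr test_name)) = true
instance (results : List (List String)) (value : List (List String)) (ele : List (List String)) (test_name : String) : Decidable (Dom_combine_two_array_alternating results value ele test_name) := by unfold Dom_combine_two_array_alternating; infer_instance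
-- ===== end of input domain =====

-- B replaces A's nested scan over the two header rows by a dict grouping right-column
-- indices by "-"-prefix, and builds each row by slice assignment instead of appends;
-- both A and B append the combined rows to `results` in place and return it (same mutation).

-- shared helper: item.split("-", 1)[0].  Exact: since "-" ≠ "" splitMax? is `some`,
-- and a split result is never empty, so neither default is ever used.
def pvPrefix (s : String) : String :=
  PySem.List.pyGetD ((PySem.Str.splitMax? s "-" 1).getD []) 0 ""

def invalid_compare_list : List String := ["pig"]

-- ===== PORT A =====
def combine_two_array_alternating (results : List (List String)) (value : List (List String)) (ele : List (List String)) (test_name : String) : List (List String) :=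
  -- indexer = [] ; for lindex, item1 in enumerate(value[0][1:]): for rindex, item2 in enumerate(ele[0][1:]): …
  let indexer : List (Int × Int) :=
    (PySem.List.enumerate (PySem.List.slice (PySem.List.pyGetD value 0 []) (some 1) none)).foldl
      (fun acc p =>
        (PySem.List.enumerate (PySem.List.slice (PySem.List.pyGetD ele 0 []) (some 1) none)).foldl
          (fun acc2 q =>
            if pvPrefix p.2 = pvPrefix q.2 then acc2 ++ [(p.1, q.1)]
            else if test_name ∈ invalid_compare_list then acc2 ++ [(p.1, q.1)]
            else acc2)
          acc)
      []
  -- for list1, list2 in zip(value, ele): holder = [list1[0]]; for index in indexer: … ; results.append(holder)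
  (value.zip ele).foldl
    (fun res pr =>
      res ++ [indexer.foldl
        (fun h ix => h ++ [PySem.List.pyGetD pr.1 (ix.1 + 1) "", PySem.List.pyGetD pr.2 (ix.2 + 1) ""])
        [PySem.List.pyGetD pr.1 0 ""]])
    results

-- ===== PORT B =====
-- hand ports of the extended-slice assignments row[1::2] = xs (pvSetOdds) and
-- row[2::2] = xs (pvSetEvens): exact whenever xs has exactly the slice's length,
-- which is the only way B uses them (width = 2*len(pairs)+1).
def pvSetOdds {α : Type} : List α → List α → List α
  | r, [] => r
  | [], _ :: _ => []
  | [a], _ :: _ => [a]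
  | a :: _ :: r, x :: xs => a :: x :: pvSetOdds r xs

def pvSetEvens {α : Type} : List α → List α → List α
  | [], _ => []
  | a :: r, xs => a :: pvSetOdds r xs

def combine_two_array_alternating_alt (results : List (List String)) (value : List (List String)) (ele : List (List String)) (test_name : String) : List (List String) :=
  let left := PySem.List.slice (PySem.List.pyGetD value 0 []) (some 1) none
  let right := PySem.List.slice (PySem.List.pyGetD ele 0 []) (some 1) none
  let pairs : List (Int × Int) :=
    if test_name ∈ invalid_compare_list then
      (PySem.List.pyRange 0 left.length 1).flatMap
        (fun l => (PySem.List.pyRange 0 right.length 1).map (fun r => (l, r)))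
    else
      -- groups = {}; for r, item in enumerate(right): groups.setdefault(prefix, []).append(r)
      let groups : PySem.Dict String (List Int) :=
        (PySem.List.enumerate right).foldl
          (fun d q => d.modify (pvPrefix q.2) [] (· ++ [q.1])) PySem.Dict.empty
      (PySem.List.enumerate left).flatMap
        (fun p => (groups.getD (pvPrefix p.2) []).map (fun r => (p.1, r)))
  let li := pairs.map (fun p => p.1 + 1)
  let ri := pairs.map (fun p => p.2 + 1)
  let width := 2 * pairs.length + 1
  (value.zip ele).foldl
    (fun res pr =>
      res ++ [pvSetEvens
        (pvSetOdds (List.replicate width (PySem.List.pyGetD pr.1 0 ""))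
          (li.map (fun i => PySem.List.pyGetD pr.1 i "")))
        (ri.map (fun i => PySem.List.pyGetD pr.2 i ""))])
    results

-- ===== PRECONDITION & SPEC =====
-- Pre_ excludes exactly the inputs where A raises IndexError (empty `value`, an empty
-- zipped row of `value`, or a matched column index past the end of a zipped row), plus
-- the inputs with `ele = []` (there A returns `results` unchanged only because its inner
-- loop never touches ele[0]; B reads ele[0] up front and raises, so they are excluded).
def Pre_combine_two_array_alternating (results : List (List String)) (value : List (List String)) (ele : List (List String)) (test_name : String) : Prop :=
  value ≠ [] ∧ ele ≠ [] ∧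
  ∀ p ∈ value.zip ele, p.1 ≠ [] ∧
    ∀ l < (value.headD []).length - 1, ∀ r < (ele.headD []).length - 1,
      (test_name = "pig" ∨
        pvPrefix ((value.headD []).getD (l + 1) "") = pvPrefix ((ele.headD []).getD (r + 1) "")) →
      l + 2 ≤ p.1.length ∧ r + 2 ≤ p.2.length
instance (results : List (List String)) (value : List (List String)) (ele : List (List String)) (test_name : String) : Decidable (Pre_combine_two_array_alternating results value ele test_name) := by unfold Pre_combine_two_array_alternating; infer_instance

def pvWitness_combine_two_array_alternating : List (List String) × List (List String) × List (List String) × String :=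
  ([], [["t", "a-1"]], [["u", "a-2"]], "x")

def Spec_combine_two_array_alternating (results : List (List String)) (value : List (List String)) (ele : List (List String)) (test_name : String) (out : List (List String)) : Prop := out = combine_two_array_alternating_alt results value ele test_name
instance (results : List (List String)) (value : List (List String)) (ele : List (List String)) (test_name : String) (out : List (List String)) : Decidable (Spec_combine_two_array_alternating results value ele test_name out) := by unfold Spec_combine_two_array_alternating; infer_instance

-- ===== CLAIM (what is proved, stated in full; the proofs are below) =====
def Claim_equal_combine_two_array_alternating : Prop := ∀ (results : List (List String)) (value : List (List String)) (ele : List (List String)) (test_name : String), Dom_combine_two_array_alternating results value ele test_name → Pre_combine_two_array_alternating results value ele test_name → Spec_combine_two_array_alternating results value ele test_name (combine_two_array_alternating results value ele test_name)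

-- ===== LEMMAS AND PROOFS =====

-- a flatMap of guarded singletons is a filter-then-map
theorem pv_flatMap_ite_singleton {α β : Type} (l : List α) (P : α → Prop) [DecidablePred P] (f : α → β) :
    l.flatMap (fun x => if P x then [f x] else []) = (l.filter (fun x => decide (P x))).map f := by
  induction l with
  | nil => rfl
  | cons x xs ih =>
    by_cases h : P x <;> simp [List.flatMap_cons, h, ih]

-- A's indexer equals B's pairs list
theorem pv_indexer_eq (L R : List String) (test_name : String) :
    (PySem.List.enumerate L).foldl
      (fun acc p =>
        (PySem.List.enumerate R).foldl
          (fun acc2 q =>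
            if pvPrefix p.2 = pvPrefix q.2 then acc2 ++ [(p.1, q.1)]
            else if test_name ∈ invalid_compare_list then acc2 ++ [(p.1, q.1)]
            else acc2)
          acc)
      ([] : List (Int × Int))
    = if test_name ∈ invalid_compare_list then
        (PySem.List.pyRange 0 L.length 1).flatMap
          (fun l => (PySem.List.pyRange 0 R.length 1).map (fun r => (l, r)))
      else
        (PySem.List.enumerate L).flatMap
          (fun p =>
            (((PySem.List.enumerate R).foldl
                (fun d q => d.modify (pvPrefix q.2) [] (· ++ [q.1])) PySem.Dict.empty).getD
              (pvPrefix p.2) []).map (fun r => (p.1, r))) := by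
  -- 1. the appending double loop is a double flatMap
  have hinner : ∀ (p : Int × String) (acc : List (Int × Int)),
      (PySem.List.enumerate R).foldl
        (fun acc2 q =>
          if pvPrefix p.2 = pvPrefix q.2 then acc2 ++ [(p.1, q.1)]
          else if test_name ∈ invalid_compare_list then acc2 ++ [(p.1, q.1)]
          else acc2) acc
      = acc ++ (PySem.List.enumerate R).flatMap
          (fun q =>
            if pvPrefix p.2 = pvPrefix q.2 then [(p.1, q.1)]
            else if test_name ∈ invalid_compare_list then [(p.1, q.1)]
            else []) := by
    intro p acc
    have hf : (fun (acc2 : List (Int × Int)) (q : Int × String) =>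
          if pvPrefix p.2 = pvPrefix q.2 then acc2 ++ [(p.1, q.1)]
          else if test_name ∈ invalid_compare_list then acc2 ++ [(p.1, q.1)]
          else acc2)
        = (fun acc2 q => acc2 ++
            (if pvPrefix p.2 = pvPrefix q.2 then [(p.1, q.1)]
             else if test_name ∈ invalid_compare_list then [(p.1, q.1)]
             else [])) := by
      funext acc2 q; split_ifs <;> simp
    rw [hf, PySem.List.foldl_append_eq_flatMap]
  have houter :
      (PySem.List.enumerate L).foldl
        (fun acc p =>
          (PySem.List.enumerate R).foldl
            (fun acc2 q =>
              if pvPrefix p.2 = pvPrefix q.2 then acc2 ++ [(p.1, q.1)]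
              else if test_name ∈ invalid_compare_list then acc2 ++ [(p.1, q.1)]
              else acc2) acc) ([] : List (Int × Int))
      = (PySem.List.enumerate L).flatMap
          (fun p => (PySem.List.enumerate R).flatMap
            (fun q =>
              if pvPrefix p.2 = pvPrefix q.2 then [(p.1, q.1)]
              else if test_name ∈ invalid_compare_list then [(p.1, q.1)]
              else [])) := by
    have hg : (fun (acc : List (Int × Int)) (p : Int × String) =>
          (PySem.List.enumerate R).foldl
            (fun acc2 q =>
              if pvPrefix p.2 = pvPrefix q.2 then acc2 ++ [(p.1, q.1)]
              else if test_name ∈ invalid_compare_list then acc2 ++ [(p.1, q.1)]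
              else acc2) acc)
        = (fun acc p => acc ++ (PySem.List.enumerate R).flatMap
            (fun q =>
              if pvPrefix p.2 = pvPrefix q.2 then [(p.1, q.1)]
              else if test_name ∈ invalid_compare_list then [(p.1, q.1)]
              else [])) := by
      funext acc p; exact hinner p acc
    rw [hg, PySem.List.foldl_append_eq_flatMap]; rfl
  rw [houter]
  by_cases htn : test_name ∈ invalid_compare_list
  · -- "pig": every (l, r) pair is emitted; both sides are the full index product
    simp only [htn, if_true, ite_self]
    have hL := PySem.List.map_fst_enumerate (xs := L) (s := 0)
    have hR := PySem.List.map_fst_enumerate (xs := R) (s := 0)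
    simp only [zero_add] at hL hR
    rw [← hL, ← hR, List.flatMap_map]
    refine List.flatMap_congr (fun p _ => ?_)
    rw [List.map_map]
    exact List.map_eq_flatMap.symm
  · -- grouping: the dict built by setdefault-append holds, per prefix, exactly the
    -- right indices whose column has that prefix, in order
    simp only [htn, if_false]
    have hdict : ∀ c : String,
        (((PySem.List.enumerate R).foldl
            (fun d q => d.modify (pvPrefix q.2) [] (· ++ [q.1])) PySem.Dict.empty).getD c [])
        = ((PySem.List.enumerate R).filter (fun q => pvPrefix q.2 == c)).map (·.1) := by
      intro c
      have h1 := (List.foldl_map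
        (f := fun q : Int × String => (pvPrefix q.2, q.1))
        (g := fun (d : PySem.Dict String (List Int)) (pr : String × Int) =>
          d.modify pr.1 [] (· ++ [pr.2]))
        (l := PySem.List.enumerate R) (init := PySem.Dict.empty)).symm
      rw [h1, PySem.Dict.getD_foldl_modify_append, PySem.Dict.getD_empty,
        List.filter_map, List.map_map]
      rfl
    refine List.flatMap_congr (fun p _ => ?_)
    rw [hdict (pvPrefix p.2),
      pv_flatMap_ite_singleton (PySem.List.enumerate R)
        (fun q => pvPrefix p.2 = pvPrefix q.2) (fun q => (p.1, q.1)),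
      List.map_map]
    have hpred : (fun q : Int × String => decide (pvPrefix p.2 = pvPrefix q.2))
        = (fun q => pvPrefix q.2 == pvPrefix p.2) := by
      funext q
      by_cases h : pvPrefix p.2 = pvPrefix q.2
      · rw [h]; simp
      · simp [h, Ne.symm h]
    rw [hpred]
    rfl

theorem pvSetOdds_cons_head {α : Type} (h : α) (t xs : List α) :
    ∃ u, pvSetOdds (h :: t) xs = h :: u := by
  cases xs with
  | nil => exact ⟨t, rfl⟩
  | cons x xs =>
    cases t with
    | nil => exact ⟨[], rfl⟩
    | cons b r => exact ⟨x :: pvSetOdds r xs, rfl⟩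

-- the two slice assignments into a [h, h, …, h] row interleave the two lists after h
theorem pv_slice_interleave {α : Type} (h : α) :
    ∀ xs ys : List α, ys.length = xs.length →
      pvSetEvens (pvSetOdds (List.replicate (2 * xs.length + 1) h) xs) ys
        = h :: (xs.zip ys).flatMap (fun p => [p.1, p.2]) := by
  intro xs
  induction xs with
  | nil =>
    intro ys hy
    cases ys with
    | nil => rfl
    | cons y ys' => simp at hy
  | cons x xs ih =>
    intro ys hy
    cases ys with
    | nil => simp at hy
    | cons y ys' =>
      have hrep2 : List.replicate (2 * (x :: xs).length + 1) h
          = h :: h :: List.replicate (2 * xs.length + 1) h := by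
        rw [List.length_cons, show 2 * (xs.length + 1) + 1 = ((2 * xs.length + 1) + 1) + 1 by ring,
          List.replicate_succ, List.replicate_succ]
      rw [hrep2]
      simp only [pvSetOdds, pvSetEvens]
      obtain ⟨u, hu⟩ := pvSetOdds_cons_head h (List.replicate (2 * xs.length) h) xs
      rw [List.replicate_succ, hu]
      simp only [pvSetOdds]
      have hih := ih ys' (by simpa using hy)
      rw [List.replicate_succ, hu] at hih
      simp only [pvSetEvens] at hih
      have htail : pvSetOdds u ys' = (xs.zip ys').flatMap (fun p => [p.1, p.2]) := by
        have := congrArg List.tail hih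
        simpa using this
      rw [htail]
      rfl

-- B's per-row value (replicate + two slice assignments over the two mapped index
-- lists) is A's per-row value (head followed by the flattened interleaved pairs)
theorem pv_row_eq (pairs : List (Int × Int)) (h : String) (f g : Int × Int → String) :
    pvSetEvens (pvSetOdds (List.replicate (2 * pairs.length + 1) h) (pairs.map f))
        (pairs.map g)
      = [h] ++ pairs.flatMap (fun ix => [f ix, g ix]) := by
  have hmain := pv_slice_interleave h (pairs.map f) (pairs.map g) (by simp)
  simp only [List.length_map] at hmain
  rw [hmain, List.zip_map', List.flatMap_map]
  rfl

-- ===== VERDICT (by name: the statement is the Claim_ definition above) =====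
theorem combine_two_array_alternating_spec : Claim_equal_combine_two_array_alternating := by
  intro results value ele test_name _hdom _hpre
  unfold Spec_combine_two_array_alternating
  simp only [combine_two_array_alternating, combine_two_array_alternating_alt]
  rw [pv_indexer_eq]
  congr 1
  funext res pr
  rw [PySem.List.foldl_append_eq_flatMap, List.map_map, List.map_map, pv_row_eq]
  rfl
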